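-- pv_equiv track=rewrite | github.com/PHIZZYXTECH/shadowsnitch-x | backend/main.py | tag_threats
-- ===== SOURCE A (Python) =====
-- def tag_threats(url):
--     tags = []
--     if "login" in url or "secure" in url:
--         tags.append("Credential Harvesting")
--     if any(shortener in url for shortener in ["bit.ly", "tinyurl", "t.co"]):
--         tags.append("Link Shortener")
--     if "verify" in url:
--         tags.append("Impersonation")
--     if "free" in url or "giveaway" in url:
--         tags.append("Scam Bait")
--     return tags
-- ===== SOURCE B (Python) =====
-- KEYWORD_TAGS = {
--     "login": "Credential Harvesting",
--     "secure": "Credential Harvesting",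
--     "bit.ly": "Link Shortener",
--     "tinyurl": "Link Shortener",
--     "t.co": "Link Shortener",
--     "verify": "Impersonation",
--     "free": "Scam Bait",
--     "giveaway": "Scam Bait",
-- }
-- TAG_ORDER = ["Credential Harvesting", "Link Shortener", "Impersonation", "Scam Bait"]
--
-- def tag_threats(url):
--     # Single scan over character positions: at each position record which
--     # keyword starts there; emit the found tags in the canonical order.
--     found = set()
--     for i in range(len(url)):
--         for kw, tag in KEYWORD_TAGS.items():
--             if url.startswith(kw, i):
--                 found.add(tag)
--     return [t for t in TAG_ORDER if t in found]
-- ===== Notes on version B (the rewrite author's own statement) =====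
-- stated objective: alternative
-- what changed: Instead of four hard-coded per-keyword substring-membership branches, B makes one scan over the character positions of the url, testing with startswith which keywords begin at each position, accumulates the matched tags in a set, and finally emits the found tags in the canonical tag order.
import Mathlib
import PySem

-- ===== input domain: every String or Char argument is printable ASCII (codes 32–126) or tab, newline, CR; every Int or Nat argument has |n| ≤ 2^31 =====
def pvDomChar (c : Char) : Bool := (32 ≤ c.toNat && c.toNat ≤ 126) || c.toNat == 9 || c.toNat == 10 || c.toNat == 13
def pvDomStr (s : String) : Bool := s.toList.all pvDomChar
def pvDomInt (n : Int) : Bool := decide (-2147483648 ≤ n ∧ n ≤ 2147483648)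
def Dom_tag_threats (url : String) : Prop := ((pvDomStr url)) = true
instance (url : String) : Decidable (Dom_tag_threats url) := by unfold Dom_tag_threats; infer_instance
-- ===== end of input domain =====

-- B replaces A's four per-keyword substring branches with one scan over character
-- positions (startswith at each index) accumulating a set of tags, emitted in
-- canonical order (objective: alternative; same asymptotic cost).


-- ===== PORT A =====
-- A: four sequential if-branches appending a tag each
def tag_threats (url : String) : List String :=
  let tags : List String := []
  let tags := if PySem.Str.isIn "login" url || PySem.Str.isIn "secure" url
    then tags ++ ["Credential Harvesting"] else tags
  let tags := if (["bit.ly", "tinyurl", "t.co"].any (fun s => PySem.Str.isIn s url))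
    then tags ++ ["Link Shortener"] else tags
  let tags := if PySem.Str.isIn "verify" url
    then tags ++ ["Impersonation"] else tags
  let tags := if PySem.Str.isIn "free" url || PySem.Str.isIn "giveaway" url
    then tags ++ ["Scam Bait"] else tags
  tags

-- ===== PORT B =====
-- B: KEYWORD_TAGS dict ported as its items list (insertion order)
def kwTable : List (String × String) :=
  [("login", "Credential Harvesting"), ("secure", "Credential Harvesting"),
   ("bit.ly", "Link Shortener"), ("tinyurl", "Link Shortener"), ("t.co", "Link Shortener"),
   ("verify", "Impersonation"),
   ("free", "Scam Bait"), ("giveaway", "Scam Bait")]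

def tagOrder : List String :=
  ["Credential Harvesting", "Link Shortener", "Impersonation", "Scam Bait"]

-- url.startswith(kw, i) with 0 ≤ i ported as startswith on the drop (exact for 0 ≤ i ≤ len)
def tag_threats_alt (url : String) : List String :=
  let found : PySem.Set String :=
    (PySem.List.pyRange 0 (PySem.Str.len url) 1).foldl
      (fun acc i =>
        kwTable.foldl
          (fun acc2 p =>
            if PySem.Chars.startswith (url.toList.drop i.toNat) p.1.toList
            then PySem.Set.add acc2 p.2 else acc2)
          acc)
      PySem.Set.empty
  tagOrder.filter (fun t => PySem.Set.contains found t)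

-- ===== PRECONDITION & SPEC =====
def Spec_tag_threats (url : String) (out : List String) : Prop := out = tag_threats_alt url
instance (url : String) (out : List String) : Decidable (Spec_tag_threats url out) := by unfold Spec_tag_threats; infer_instance

-- ===== CLAIM (what is proved, stated in full; the proofs are below) =====
def Claim_equal_tag_threats : Prop := ∀ (url : String), Dom_tag_threats url → Spec_tag_threats url (tag_threats url)

-- ===== LEMMAS AND PROOFS =====

-- membership in the inner fold over the keyword table
theorem mem_inner_fold (cs : List Char) (i : Int) (table : List (String × String))
    (acc : PySem.Set String) (t : String) :
    t ∈ table.foldl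
        (fun acc2 p =>
          if PySem.Chars.startswith (cs.drop i.toNat) p.1.toList
          then PySem.Set.add acc2 p.2 else acc2) acc
      ↔ t ∈ acc ∨ ∃ p ∈ table, PySem.Chars.startswith (cs.drop i.toNat) p.1.toList = true ∧ p.2 = t := by
  induction table generalizing acc with
  | nil => simp
  | cons q qs ih =>
    simp only [List.foldl_cons, ih, List.mem_cons]
    by_cases h : PySem.Chars.startswith (cs.drop i.toNat) q.1.toList = true
    · simp only [if_pos h, PySem.Set.mem_add]
      constructor
      · rintro ((hm | rfl) | ⟨p, hp, hs, ht⟩)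
        · exact Or.inl hm
        · exact Or.inr ⟨q, Or.inl rfl, h, rfl⟩
        · exact Or.inr ⟨p, Or.inr hp, hs, ht⟩
      · rintro (hm | ⟨p, (rfl | hp), hs, ht⟩)
        · exact Or.inl (Or.inl hm)
        · exact Or.inl (Or.inr ht.symm)
        · exact Or.inr ⟨p, hp, hs, ht⟩
    · simp only [if_neg h]
      constructor
      · rintro (hm | ⟨p, hp, hs, ht⟩)
        · exact Or.inl hm
        · exact Or.inr ⟨p, Or.inr hp, hs, ht⟩
      · rintro (hm | ⟨p, (rfl | hp), hs, ht⟩)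
        · exact Or.inl hm
        · exact absurd hs h
        · exact Or.inr ⟨p, hp, hs, ht⟩

-- membership in the outer fold over the positions
theorem mem_outer_fold (cs : List Char) (idxs : List Int) (acc : PySem.Set String) (t : String) :
    t ∈ idxs.foldl
        (fun acc i =>
          kwTable.foldl
            (fun acc2 p =>
              if PySem.Chars.startswith (cs.drop i.toNat) p.1.toList
              then PySem.Set.add acc2 p.2 else acc2) acc) acc
      ↔ t ∈ acc ∨ ∃ i ∈ idxs, ∃ p ∈ kwTable,
          PySem.Chars.startswith (cs.drop i.toNat) p.1.toList = true ∧ p.2 = t := by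
  induction idxs generalizing acc with
  | nil => simp
  | cons j js ih =>
    simp only [List.foldl_cons, ih, mem_inner_fold, List.mem_cons]
    constructor
    · rintro ((hm | ⟨p, hp, hs, ht⟩) | ⟨i, hi, rest⟩)
      · exact Or.inl hm
      · exact Or.inr ⟨j, Or.inl rfl, p, hp, hs, ht⟩
      · exact Or.inr ⟨i, Or.inr hi, rest⟩
    · rintro (hm | ⟨i, (rfl | hi), rest⟩)
      · exact Or.inl (Or.inl hm)
      · exact Or.inl (Or.inr rest)
      · exact Or.inr ⟨i, hi, rest⟩

-- a nonempty keyword starts at some position in range(len) iff it is a substring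
theorem exists_pos_iff_isIn (cs : List Char) (kw : List Char) (hk : kw ≠ []) :
    (∃ i ∈ PySem.List.pyRange 0 (cs.length : Int) 1,
        PySem.Chars.startswith (cs.drop i.toNat) kw = true)
      ↔ PySem.Chars.isIn kw cs = true := by
  rw [← PySem.Chars.exists_prefix_drop_iff_isIn]
  constructor
  · rintro ⟨i, hi, hs⟩
    exact ⟨i.toNat, (PySem.Chars.startswith_iff _ _).mp hs⟩
  · rintro ⟨j, hj⟩
    have hjlt : j < cs.length := by
      by_contra h
      rw [List.drop_eq_nil_of_le (le_of_not_gt h)] at hj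
      exact hk (List.prefix_nil.mp hj)
    refine ⟨(j : Int), ?_, ?_⟩
    · rw [PySem.List.mem_pyRange_one]
      constructor <;> [positivity; exact_mod_cast hjlt]
    · rw [PySem.Chars.startswith_iff]
      simpa using hj

-- the found set contains tag t iff some keyword mapped to t occurs in url
theorem contains_found_iff (url : String) (t : String) :
    (t ∈ (PySem.List.pyRange 0 (PySem.Str.len url) 1).foldl
        (fun acc i =>
          kwTable.foldl
            (fun acc2 p =>
              if PySem.Chars.startswith (url.toList.drop i.toNat) p.1.toList
              then PySem.Set.add acc2 p.2 else acc2) acc) PySem.Set.empty)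
      ↔ ∃ p ∈ kwTable, PySem.Chars.isIn p.1.toList url.toList = true ∧ p.2 = t := by
  rw [mem_outer_fold]
  have hlen : PySem.Str.len url = (url.toList.length : Int) := by
    simp [PySem.Str.len_eq]
  constructor
  · rintro (h | ⟨i, hi, p, hp, hs, ht⟩)
    · simp [PySem.Set.empty] at h
    · refine ⟨p, hp, ?_, ht⟩
      rw [← exists_pos_iff_isIn url.toList p.1.toList (by fin_cases hp <;> simp)]
      exact ⟨i, by rwa [hlen] at hi, hs⟩
  · rintro ⟨p, hp, hin, ht⟩
    rw [← exists_pos_iff_isIn url.toList p.1.toList (by fin_cases hp <;> simp)] at hin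
    rcases hin with ⟨i, hi, hs⟩
    exact Or.inr ⟨i, by rwa [hlen], p, hp, hs, ht⟩

-- ===== VERDICT (by name: the statement is the Claim_ definition above) =====
set_option maxHeartbeats 1000000 in
theorem tag_threats_spec : Claim_equal_tag_threats := by
  intro url _
  unfold Spec_tag_threats tag_threats
  obtain ⟨F, hF, hc⟩ : ∃ F : PySem.Set String,
      tag_threats_alt url = tagOrder.filter (fun t => PySem.Set.contains F t) ∧
      ∀ t : String, (PySem.Set.contains F t = true)
        ↔ ∃ p ∈ kwTable, PySem.Chars.isIn p.1.toList url.toList = true ∧ p.2 = t :=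
    ⟨_, rfl, fun t => (PySem.Set.contains_iff _ _).trans (contains_found_iff url t)⟩
  rw [hF]
  have e1 : F.contains "Credential Harvesting"
      = (PySem.Chars.isIn ['l','o','g','i','n'] url.toList
         || PySem.Chars.isIn ['s','e','c','u','r','e'] url.toList) := by
    rw [Bool.eq_iff_iff, hc]
    simp [kwTable]
  have e2 : F.contains "Link Shortener"
      = (PySem.Chars.isIn ['b','i','t','.','l','y'] url.toList
         || PySem.Chars.isIn ['t','i','n','y','u','r','l'] url.toList
         || PySem.Chars.isIn ['t','.','c','o'] url.toList) := by
    rw [Bool.eq_iff_iff, hc]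
    simp [kwTable]
    tauto
  have e3 : F.contains "Impersonation"
      = PySem.Chars.isIn ['v','e','r','i','f','y'] url.toList := by
    rw [Bool.eq_iff_iff, hc]
    simp [kwTable]
  have e4 : F.contains "Scam Bait"
      = (PySem.Chars.isIn ['f','r','e','e'] url.toList
         || PySem.Chars.isIn ['g','i','v','e','a','w','a','y'] url.toList) := by
    rw [Bool.eq_iff_iff, hc]
    simp [kwTable]
  simp only [tagOrder, List.filter_cons, List.filter_nil, e1, e2, e3, e4]
  cases h1 : PySem.Chars.isIn ['l','o','g','i','n'] url.toList <;>
  cases h2 : PySem.Chars.isIn ['s','e','c','u','r','e'] url.toList <;>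
  cases h3 : PySem.Chars.isIn ['b','i','t','.','l','y'] url.toList <;>
  cases h4 : PySem.Chars.isIn ['t','i','n','y','u','r','l'] url.toList <;>
  cases h5 : PySem.Chars.isIn ['t','.','c','o'] url.toList <;>
  cases h6 : PySem.Chars.isIn ['v','e','r','i','f','y'] url.toList <;>
  cases h7 : PySem.Chars.isIn ['f','r','e','e'] url.toList <;>
  cases h8 : PySem.Chars.isIn ['g','i','v','e','a','w','a','y'] url.toList <;>
  simp [h1, h2, h3, h4, h5, h6, h7, h8]
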